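-- pv_equiv track=rewrite | github.com/chaeonee/Programmers | level2/[1차]프렌즈4블록.py | rearrangeBlock
-- ===== SOURCE A (Python) =====
-- def rearrangeBlock(board):
--     m, n = len(board), len(board[0])
--
--     blank = [-1]*n
--     for j in range(n):
--         for i in range(m-1,-1,-1):
--             if board[i][j] == '0':
--                 blank[j] = i
--                 break
--
--     for j in range(n):
--         s = blank[j] - 1
--         for i in range(s,-1,-1):
--             if board[i][j] != '0':
--                 board[blank[j]][j] = board[i][j]
--                 board[i][j] = '0'
--                 blank[j] -= 1
--
--     return board
-- ===== SOURCE B (Python) =====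
-- def rearrangeBlock(board):
--     m, n = len(board), len(board[0])
--     for j in range(n):
--         vals = [board[i][j] for i in range(m) if board[i][j] != '0']
--         k = m - len(vals)
--         for i in range(m):
--             board[i][j] = '0' if i < k else vals[i - k]
--     return board
-- ===== Notes on version B (the rewrite author's own statement) =====
-- stated objective: simpler
-- what changed: Per column, B collects the non-'0' cells in order and rewrites the column as zero-padding on top plus those values, replacing A's two-phase lowest-blank search and in-place swap/decrement scheme.
import Mathlib
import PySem

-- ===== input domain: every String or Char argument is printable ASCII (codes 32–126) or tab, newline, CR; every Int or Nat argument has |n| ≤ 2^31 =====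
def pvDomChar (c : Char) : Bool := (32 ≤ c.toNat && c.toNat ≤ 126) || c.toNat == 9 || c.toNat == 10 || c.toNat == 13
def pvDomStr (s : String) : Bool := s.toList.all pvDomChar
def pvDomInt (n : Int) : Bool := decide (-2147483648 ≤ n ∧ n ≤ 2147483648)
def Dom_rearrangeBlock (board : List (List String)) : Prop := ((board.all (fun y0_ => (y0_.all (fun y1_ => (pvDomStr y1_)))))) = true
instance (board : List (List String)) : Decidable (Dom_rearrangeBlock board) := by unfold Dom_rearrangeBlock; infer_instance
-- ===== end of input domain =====

-- B replaces A's two-phase lowest-blank search plus swap/decrement scheme with a per-column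
-- "collect non-'0' values, rewrite as zero padding + values" pass (objective: simpler).
-- Both Pythons mutate `board` in place and return it; the equivalence proved is about the return value.

-- ===== PORT A =====
-- board[i][j] read / board[i][j] = v write; inside Pre_ every index used is in range, so getD/set are exact.
def pvCellGet (board : List (List String)) (i j : Nat) : String := (board.getD i []).getD j ""
def pvCellSet (board : List (List String)) (i j : Nat) (v : String) : List (List String) :=
  board.set i ((board.getD i []).set j v)

-- 'for i in range(m-1,-1,-1): if board[i][j]=='0': blank[j]=i; break' — fuel counts down from m
def pvFindBlank (board : List (List String)) (j : Nat) : Nat → Int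
  | 0 => -1
  | i+1 => if pvCellGet board i j = "0" then (i : Int) else pvFindBlank board j i

-- 'for i in range(s,-1,-1): …' of the second phase; fuel = s+1 = blank iterations.
-- blank ≥ i+1 ≥ 1 whenever the write branch runs, so blank.toNat is exact there.
def pvDrop (j : Nat) : List (List String) → Int → Nat → List (List String)
  | board, _, 0 => board
  | board, blank, i+1 =>
    if pvCellGet board i j ≠ "0" then
      pvDrop j (pvCellSet (pvCellSet board blank.toNat j (pvCellGet board i j)) i j "0") (blank - 1) i
    else pvDrop j board blank i

def rearrangeBlock (board : List (List String)) : List (List String) :=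
  let m := board.length
  let n := ((PySem.List.pyGet? board 0).getD []).length  -- len(board[0]); the getD default only matters outside Pre_
  let blank := (List.range n).map (fun j => pvFindBlank board j m)
  (List.range n).foldl
    (fun b j => pvDrop j b (blank.getD j (-1)) (blank.getD j (-1)).toNat) board

-- ===== PORT B =====
def rearrangeBlock_alt (board : List (List String)) : List (List String) :=
  let m := board.length
  let n := ((PySem.List.pyGet? board 0).getD []).length
  (List.range n).foldl
    (fun b j =>
      let vals := ((List.range m).map (fun i => pvCellGet b i j)).filter (fun v => v ≠ "0")
      let k := m - vals.length
      (List.range m).foldl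
        (fun b' i => pvCellSet b' i j (if i < k then "0" else vals.getD (i - k) "")) b)
    board

-- ===== PRECONDITION & SPEC =====
-- Pre_ is exactly where the Python A returns: a nonempty board whose rows all have at least
-- len(board[0]) entries (otherwise board[0] or board[i][j] raises IndexError).
def Pre_rearrangeBlock (board : List (List String)) : Prop :=
  board ≠ [] ∧ ∀ row ∈ board, (board.headD []).length ≤ row.length
instance (board : List (List String)) : Decidable (Pre_rearrangeBlock board) := by
  unfold Pre_rearrangeBlock; infer_instance

def pvWitness_rearrangeBlock : List (List String) :=
  [["1", "0"], ["0", "2"], ["3", "0"]]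

def Spec_rearrangeBlock (board : List (List String)) (out : List (List String)) : Prop := out = rearrangeBlock_alt board
instance (board : List (List String)) (out : List (List String)) : Decidable (Spec_rearrangeBlock board out) := by unfold Spec_rearrangeBlock; infer_instance

-- ===== CLAIM (what is proved, stated in full; the proofs are below) =====
def Claim_equal_rearrangeBlock : Prop := ∀ (board : List (List String)), Dom_rearrangeBlock board → Pre_rearrangeBlock board → Spec_rearrangeBlock board (rearrangeBlock board)

-- ===== LEMMAS AND PROOFS =====

-- column j of a board (getD-default view; rows shorter than j+1 contribute "")
def pvCol (b : List (List String)) (j : Nat) : List String := b.map (fun r => r.getD j "")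

-- pure column-level mirror of pvFindBlank
def pvFindBlankCol (c : List String) : Nat → Int
  | 0 => -1
  | i+1 => if c.getD i "" = "0" then (i : Int) else pvFindBlankCol c i

-- pure column-level mirror of pvDrop
def pvDropCol : List String → Int → Nat → List String
  | c, _, 0 => c
  | c, blank, i+1 =>
    if c.getD i "" ≠ "0" then
      pvDropCol ((c.set blank.toNat (c.getD i "")).set i "0") (blank - 1) i
    else pvDropCol c blank i

-- gravity: zeros on top, the non-'0' values in order below
def pvGrav (c : List String) : List String :=
  List.replicate (c.length - (c.filter (fun v => v ≠ "0")).length) "0" ++ c.filter (fun v => v ≠ "0")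

theorem pvCellGet_col (b : List (List String)) (i j : Nat) :
    pvCellGet b i j = (pvCol b j).getD i "" := by
  simp only [pvCellGet, pvCol, List.getD_eq_getElem?_getD, List.getElem?_map]
  cases b[i]? <;> rfl

theorem pvCol_length (b : List (List String)) (j : Nat) : (pvCol b j).length = b.length := by
  simp [pvCol]

theorem pvCellSet_rowlens (b : List (List String)) (i j : Nat) (v : String) :
    (pvCellSet b i j v).map List.length = b.map List.length := by
  unfold pvCellSet
  rw [List.map_set]
  by_cases hi : i < b.length
  · rw [List.length_set, List.getD_eq_getElem b [] hi]
    have : (b.map List.length)[i]'(by simpa using hi) = b[i].length := by simp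
    rw [← this, List.set_getElem_self]
  · exact List.set_eq_of_length_le (by simpa using Nat.le_of_not_lt hi)

theorem pvCol_cellSet_ne (b : List (List String)) (i j j' : Nat) (v : String) (h : j' ≠ j) :
    pvCol (pvCellSet b i j v) j' = pvCol b j' := by
  unfold pvCellSet pvCol
  rw [List.map_set]
  have hv : ((b.getD i []).set j v).getD j' "" = (b.getD i []).getD j' "" := by
    simp [List.getD_eq_getElem?_getD, List.getElem?_set_ne (Ne.symm h)]
  rw [hv]
  by_cases hi : i < b.length
  · rw [List.getD_eq_getElem b [] hi]
    have : (b.map (fun r => r.getD j' ""))[i]'(by simpa using hi) = b[i].getD j' "" := by simp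
    rw [← this, List.set_getElem_self]
  · exact List.set_eq_of_length_le (by simpa using Nat.le_of_not_lt hi)

theorem pvCol_cellSet_self (b : List (List String)) (i j : Nat) (v : String)
    (hi : i < b.length) (hj : j < (b.getD i []).length) :
    pvCol (pvCellSet b i j v) j = (pvCol b j).set i v := by
  unfold pvCellSet pvCol
  rw [List.map_set]
  congr 1
  have : j < ((b.getD i []).set j v).length := by simpa using hj
  rw [List.getD_eq_getElem _ "" this, List.getElem_set_self]

theorem pvRowlens_lt (b b0 : List (List String)) (j : Nat)
    (h : b.map List.length = b0.map List.length) (h0 : ∀ r ∈ b0, j < r.length) :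
    ∀ r ∈ b, j < r.length := by
  intro r hr
  have : r.length ∈ b0.map List.length := by rw [← h]; exact List.mem_map_of_mem hr
  obtain ⟨r0, hr0, hlen⟩ := List.mem_map.1 this
  rw [← hlen]; exact h0 r0 hr0

theorem pvFindBlank_col (b : List (List String)) (j : Nat) :
    ∀ fuel, pvFindBlank b j fuel = pvFindBlankCol (pvCol b j) fuel := by
  intro fuel
  induction fuel with
  | zero => rfl
  | succ i ih => simp only [pvFindBlank, pvFindBlankCol, pvCellGet_col, ih]

theorem pvFindBlankCol_spec (c : List String) :
    ∀ fuel, (pvFindBlankCol c fuel = -1 ∧ ∀ t < fuel, c.getD t "" ≠ "0") ∨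
      (∃ i : Nat, pvFindBlankCol c fuel = (i : Int) ∧ i < fuel ∧ c.getD i "" = "0" ∧
        ∀ t, i < t → t < fuel → c.getD t "" ≠ "0") := by
  intro fuel
  induction fuel with
  | zero => exact Or.inl ⟨rfl, by omega⟩
  | succ i ih =>
    by_cases h : c.getD i "" = "0"
    · exact Or.inr ⟨i, by simp only [pvFindBlankCol]; rw [if_pos h], Nat.lt_succ_self i, h, by omega⟩
    · rcases ih with ⟨h1, h2⟩ | ⟨t, h1, h2, h3, h4⟩
      · refine Or.inl ⟨by simp only [pvFindBlankCol]; rw [if_neg h, h1], ?_⟩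
        intro u hu
        by_cases hui : u = i
        · exact hui ▸ h
        · exact h2 u (by omega)
      · refine Or.inr ⟨t, by simp only [pvFindBlankCol]; rw [if_neg h, h1], by omega, h3, ?_⟩
        intro u hu1 hu2
        by_cases hui : u = i
        · exact hui ▸ h
        · exact h4 u hu1 (by omega)

-- commute the board-level phase-2 loop with its column-level mirror
theorem pvDrop_col : ∀ (fuel : Nat) (b : List (List String)) (j : Nat) (blank : Int),
    (∀ r ∈ b, j < r.length) →
    (fuel = 0 ∨ ((fuel : Int) ≤ blank ∧ blank < (b.length : Int))) →
    (pvDrop j b blank fuel).map List.length = b.map List.length ∧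
    pvCol (pvDrop j b blank fuel) j = pvDropCol (pvCol b j) blank fuel ∧
    ∀ j', j' ≠ j → pvCol (pvDrop j b blank fuel) j' = pvCol b j' := by
  intro fuel
  induction fuel with
  | zero => exact fun b j blank _ _ => ⟨rfl, rfl, fun _ _ => rfl⟩
  | succ i ih =>
    intro b j blank Hj H
    rcases H with h0 | ⟨h1, h2⟩
    · omega
    have hits : (0:Int) ≤ blank := by omega
    have htn : (blank.toNat : Int) = blank := Int.toNat_of_nonneg hits
    have hbl : blank.toNat < b.length := by omega
    have hil : i < b.length := by omega
    have hmem : ∀ t, t < b.length → b.getD t [] ∈ b := by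
      intro t ht; rw [List.getD_eq_getElem b [] ht]; exact List.getElem_mem ht
    simp only [pvDrop, pvDropCol, pvCellGet_col]
    by_cases hc : (pvCol b j).getD i "" ≠ "0"
    · rw [if_pos hc, if_pos hc]
      set v := (pvCol b j).getD i "" with hv
      set b1 := pvCellSet b blank.toNat j v with hb1
      set b2 := pvCellSet b1 i j "0" with hb2
      have hlen1 : b1.map List.length = b.map List.length := pvCellSet_rowlens b blank.toNat j v
      have hlen2 : b2.map List.length = b.map List.length := by
        rw [hb2]; rw [pvCellSet_rowlens]; exact hlen1
      have hL2 : b2.length = b.length := by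
        have := congrArg List.length hlen2; simpa using this
      have Hj1 : ∀ r ∈ b1, j < r.length := pvRowlens_lt b1 b j hlen1 Hj
      have Hj2 : ∀ r ∈ b2, j < r.length := pvRowlens_lt b2 b j hlen2 Hj
      have hL1 : b1.length = b.length := by
        have := congrArg List.length hlen1; simpa using this
      have hcol1 : pvCol b1 j = (pvCol b j).set blank.toNat v :=
        pvCol_cellSet_self b blank.toNat j v hbl (Hj _ (hmem _ hbl))
      have hmem1 : b1.getD i [] ∈ b1 := by
        rw [List.getD_eq_getElem b1 [] (by omega)]; exact List.getElem_mem (by omega)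
      have hcol2 : pvCol b2 j = ((pvCol b j).set blank.toNat v).set i "0" := by
        rw [hb2, pvCol_cellSet_self b1 i j "0" (by omega) (Hj1 _ hmem1), hcol1]
      obtain ⟨ih1, ih2, ih3⟩ := ih b2 j (blank - 1) Hj2
        (by rcases Nat.eq_zero_or_pos i with h | h
            · exact Or.inl h
            · right; constructor <;> omega)
      refine ⟨ih1.trans hlen2, ?_, ?_⟩
      · rw [ih2, hcol2]
      · intro j' hj'
        rw [ih3 j' hj', hb2, pvCol_cellSet_ne _ _ _ _ _ hj', hb1,
          pvCol_cellSet_ne _ _ _ _ _ hj']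
    · rw [if_neg hc, if_neg hc]
      exact ih b j blank Hj (by right; constructor <;> omega)

-- drop at the set position exposes the written value
theorem pvDrop_set (c : List String) (n : Nat) (a : String) (h : n < c.length) :
    (c.set n a).drop n = a :: c.drop (n + 1) := by
  apply List.ext_getElem (by simp; omega)
  intro t h1 h2
  rcases Nat.eq_zero_or_pos t with rfl | ht
  · simp [List.getElem_drop, List.getElem_set_self]
  · simp only [List.getElem_drop]
    rw [List.getElem_set_ne (by omega)]
    cases t with
    | zero => omega
    | succ u => simp; congr 1; omega

-- a list whose first b+1 entries are all "0" is replicate (b+1) "0" ++ its tail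
theorem pvPrefix_zero (c : List String) (b : Nat) (hb : b < c.length)
    (h : ∀ t ≤ b, c.getD t "" = "0") :
    c = List.replicate (b + 1) "0" ++ c.drop (b + 1) := by
  apply List.ext_getElem (by simp; omega)
  intro t h1 h2
  rw [List.getElem_append]
  split
  · next ht =>
    have ht' : t ≤ b := by simpa using Nat.lt_succ_iff.mp (by simpa using ht)
    have := h t ht'
    rw [List.getD_eq_getElem c "" h1] at this
    simp [this]
  · next ht =>
    rw [List.getElem_drop]
    congr 1
    simp at ht ⊢
    omega

-- loop invariant for the phase-2 column loop
theorem pvDropCol_inv : ∀ (k : Nat) (c : List String) (blank : Int),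
    (k : Int) ≤ blank → blank < (c.length : Int) →
    (∀ t : Nat, k ≤ t → (t : Int) ≤ blank → c.getD t "" = "0") →
    pvDropCol c blank k =
      List.replicate (blank.toNat + 1 - ((c.take k).filter (fun v => v ≠ "0")).length) "0" ++
        (c.take k).filter (fun v => v ≠ "0") ++ c.drop (blank.toNat + 1) := by
  intro k
  induction k with
  | zero =>
    intro c blank h1 h2 h3
    have hbn : blank.toNat < c.length := by omega
    have := pvPrefix_zero c blank.toNat hbn (fun t ht => h3 t (Nat.zero_le t) (by omega))
    simpa using this
  | succ i ih =>
    intro c blank h1 h2 h3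
    have hbn1 : (blank.toNat : Int) = blank := Int.toNat_of_nonneg (by omega)
    have hbn : blank.toNat < c.length := by omega
    have hibn : i + 1 ≤ blank.toNat := by omega
    have hil : i < c.length := by omega
    simp only [pvDropCol]
    by_cases hc : c.getD i "" ≠ "0"
    · rw [if_pos hc]
      set v := c.getD i "" with hv
      set c' := (c.set blank.toNat v).set i "0" with hc'
      have hlen' : c'.length = c.length := by simp [hc']
      have hinv : ∀ t : Nat, i ≤ t → (t : Int) ≤ blank - 1 → c'.getD t "" = "0" := by
        intro t ht1 ht2
        rcases Nat.eq_or_lt_of_le ht1 with h | h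
        · subst h
          rw [hc', List.getD_eq_getElem?_getD, List.getElem?_set_self (by simpa using hil)]
          rfl
        · have htne : t ≠ i := by omega
          have htbn : t ≠ blank.toNat := by omega
          rw [hc']
          simp only [List.getD_eq_getElem?_getD,
            List.getElem?_set_ne (Ne.symm htne), List.getElem?_set_ne (Ne.symm htbn)]
          have := h3 t (by omega) (by omega)
          rwa [List.getD_eq_getElem?_getD] at this
      rw [ih c' (blank - 1) (by omega) (by omega) hinv]
      have e1 : (blank - 1).toNat + 1 = blank.toNat := by omega
      have e2 : c'.take i = c.take i := by
        rw [hc', List.take_set_of_le (le_refl i), List.take_set_of_le (show i ≤ blank.toNat by omega)]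
      have e3 : c'.drop ((blank - 1).toNat + 1) = v :: c.drop (blank.toNat + 1) := by
        rw [e1, hc', List.drop_set_of_lt (show i < blank.toNat by omega),
          pvDrop_set c blank.toNat v hbn]
      have e4 : (c.take (i + 1)).filter (fun v => v ≠ "0") =
          (c.take i).filter (fun v => v ≠ "0") ++ [v] := by
        rw [List.take_succ, List.filter_append]
        congr 1
        have hcv : getElem c i hil = v := by rw [hv, List.getD_eq_getElem c "" hil]
        simp [List.getElem?_eq_getElem hil, hcv, hc]
      rw [e2, e3, e4]
      simp
      omega
    · rw [if_neg hc]
      have hinv : ∀ t : Nat, i ≤ t → (t : Int) ≤ blank → c.getD t "" = "0" := by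
        intro t ht1 ht2
        rcases Nat.eq_or_lt_of_le ht1 with h | h
        · subst h; simpa using hc
        · exact h3 t (by omega) ht2
      rw [ih c blank (by omega) h2 hinv]
      have e4 : (c.take (i + 1)).filter (fun v => v ≠ "0") =
          (c.take i).filter (fun v => v ≠ "0") := by
        rw [List.take_succ, List.filter_append]
        have hcv : getElem c i hil = "0" := by
          rw [← List.getD_eq_getElem c "" hil]; simpa using hc
        simp [List.getElem?_eq_getElem hil, hcv]
      rw [e4]

theorem pvDropCol_grav (c : List String) :
    pvDropCol c (pvFindBlankCol c c.length) (pvFindBlankCol c c.length).toNat = pvGrav c := by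
  rcases pvFindBlankCol_spec c c.length with ⟨h1, h2⟩ | ⟨i, h1, h2, h3, h4⟩
  · rw [h1]
    have hf : c.filter (fun v => v ≠ "0") = c := by
      apply List.filter_eq_self.mpr
      intro x hx
      obtain ⟨t, ht, rfl⟩ := List.mem_iff_getElem.1 hx
      have := h2 t ht
      rw [List.getD_eq_getElem c "" ht] at this
      simpa using this
    show c = pvGrav c
    rw [pvGrav, hf]
    simp
  · rw [h1]
    have hit : ((i : Int)).toNat = i := by simp
    rw [hit]
    have hinv : ∀ t : Nat, i ≤ t → (t : Int) ≤ (i : Int) → c.getD t "" = "0" := by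
      intro t ht1 ht2
      have : t = i := by omega
      rw [this]; exact h3
    rw [pvDropCol_inv i c (i : Int) (le_refl _) (by exact_mod_cast h2) hinv, hit]
    have hdropne : ∀ x ∈ c.drop (i + 1), x ≠ "0" := by
      intro x hx
      obtain ⟨t, ht, hxe⟩ := List.mem_iff_getElem.1 hx
      rw [List.getElem_drop] at hxe
      have hlt : i + 1 + t < c.length := by
        have := ht; simp only [List.length_drop] at this; omega
      have := h4 (i + 1 + t) (by omega) hlt
      rw [List.getD_eq_getElem c "" hlt] at this
      rw [← hxe]
      exact this
    have hsplit : c.filter (fun v => v ≠ "0") =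
        (c.take i).filter (fun v => v ≠ "0") ++ c.drop (i + 1) := by
      conv_lhs => rw [← List.take_append_drop i c]
      rw [List.filter_append, List.drop_eq_getElem_cons h2]
      congr 1
      have hc0 : getElem c i h2 = "0" := by rw [← List.getD_eq_getElem c "" h2]; exact h3
      have hfil : (c.drop (i + 1)).filter (fun v => v ≠ "0") = c.drop (i + 1) := by
        apply List.filter_eq_self.mpr
        intro a ha; simpa using hdropne a ha
      rw [List.filter_cons]
      simp [hc0]
      exact fun a ha => hdropne a ha
    rw [pvGrav, hsplit]
    have hF : ((c.take i).filter (fun v => v ≠ "0")).length ≤ i := by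
      calc ((c.take i).filter (fun v => v ≠ "0")).length ≤ (c.take i).length :=
            List.length_filter_le _ _
        _ ≤ i := by simp
    have hD : (c.drop (i + 1)).length = c.length - (i + 1) := by simp
    have hcoef : c.length - (((c.take i).filter (fun v => v ≠ "0")).length + (c.drop (i + 1)).length) =
        i + 1 - ((c.take i).filter (fun v => v ≠ "0")).length := by
      rw [hD]; omega
    rw [List.length_append, hcoef]
    simp [List.append_assoc]

-- the B-side inner write loop, column view
theorem pvWrite_col : ∀ (t : Nat) (b : List (List String)) (j : Nat) (f : Nat → String),
    (∀ r ∈ b, j < r.length) → t ≤ b.length →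
    ((List.range t).foldl (fun b' i => pvCellSet b' i j (f i)) b).map List.length = b.map List.length ∧
    pvCol ((List.range t).foldl (fun b' i => pvCellSet b' i j (f i)) b) j =
      (List.range t).map f ++ (pvCol b j).drop t ∧
    ∀ j', j' ≠ j → pvCol ((List.range t).foldl (fun b' i => pvCellSet b' i j (f i)) b) j' = pvCol b j' := by
  intro t
  induction t with
  | zero => exact fun b j f _ _ => ⟨rfl, by simp [List.range_zero], fun _ _ => rfl⟩
  | succ t ih =>
    intro b j f Hj Ht
    obtain ⟨ih1, ih2, ih3⟩ := ih b j f Hj (by omega)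
    set W := (List.range t).foldl (fun b' i => pvCellSet b' i j (f i)) b with hW
    have hfold : (List.range (t + 1)).foldl (fun b' i => pvCellSet b' i j (f i)) b =
        pvCellSet W t j (f t) := by
      rw [List.range_succ, List.foldl_append]
      rfl
    have hWlen : W.length = b.length := by
      have := congrArg List.length ih1; simpa using this
    have HjW : ∀ r ∈ W, j < r.length := pvRowlens_lt W b j ih1 Hj
    have htW : t < W.length := by omega
    have hmemW : W.getD t [] ∈ W := by
      rw [List.getD_eq_getElem W [] htW]; exact List.getElem_mem htW
    refine ⟨?_, ?_, ?_⟩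
    · rw [hfold, pvCellSet_rowlens, ih1]
    · rw [hfold, pvCol_cellSet_self W t j (f t) htW (HjW _ hmemW), ih2]
      have hpre : ((List.range t).map f).length = t := by simp
      rw [List.set_append]
      rw [if_neg (by omega : ¬ t < ((List.range t).map f).length)]
      rw [hpre, Nat.sub_self]
      have hdrop : (pvCol b j).drop t = getElem (pvCol b j) t (by rw [pvCol_length]; omega) ::
          (pvCol b j).drop (t + 1) := List.drop_eq_getElem_cons _
      rw [hdrop, List.set_cons_zero, List.range_succ, List.map_append]
      simp
    · intro j' hj'
      rw [hfold, pvCol_cellSet_ne _ _ _ _ _ hj', ih3 j' hj']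

theorem pvMap_range_getD (c : List String) :
    (List.range c.length).map (fun i => c.getD i "") = c := by
  apply List.ext_getElem (by simp)
  intro t h1 h2
  simp [List.getElem?_eq_getElem h2]

theorem pvPad_map (c : List String) :
    (List.range c.length).map
        (fun i => if i < c.length - (c.filter (fun v => v ≠ "0")).length then "0"
          else (c.filter (fun v => v ≠ "0")).getD (i - (c.length - (c.filter (fun v => v ≠ "0")).length)) "") =
      pvGrav c := by
  have hv : (c.filter (fun v => v ≠ "0")).length ≤ c.length := List.length_filter_le _ _
  apply List.ext_getElem
    (by simp only [pvGrav, List.length_append, List.length_replicate, List.length_map,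
          List.length_range]; omega)
  intro t h1 h2
  have ht : t < c.length := by simpa using h1
  rw [List.getElem_map, List.getElem_range]
  simp only [pvGrav] at h2 ⊢
  rw [List.getElem_append]
  split
  · next hrep =>
    split
    · simp
    · next h' =>
      exfalso
      simp only [List.length_replicate] at h'
      exact h' hrep
  · next hrep =>
    split
    · next h' =>
      exfalso
      simp only [List.length_replicate] at h'
      exact hrep h'
    · next h' =>
      simp only [List.length_replicate] at h' ⊢
      have hlt : t - (c.length - (c.filter (fun v => v ≠ "0")).length) <
          (c.filter (fun v => v ≠ "0")).length := by
        simp only [List.length_append, List.length_replicate] at h2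
        omega
      rw [List.getD_eq_getElem _ "" hlt]

theorem pvBoard_ext (b1 b2 : List (List String))
    (hl : b1.map List.length = b2.map List.length)
    (hc : ∀ j, pvCol b1 j = pvCol b2 j) : b1 = b2 := by
  have hlen : b1.length = b2.length := by
    have := congrArg List.length hl; simpa using this
  apply List.ext_getElem hlen
  intro i h1 h2
  have hrl : (getElem b1 i h1).length = (getElem b2 i h2).length := by
    have e1 : (b1.map List.length)[i]'(by simpa using h1) = (getElem b1 i h1).length := by simp
    have e2 : (b2.map List.length)[i]'(by simpa using h2) = (getElem b2 i h2).length := by simp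
    rw [← e1, ← e2]
    exact List.getElem_of_eq hl _
  apply List.ext_getElem hrl
  intro j hj1 hj2
  have f1 : (pvCol b1 j)[i]'(by simpa [pvCol] using h1) = (getElem b1 i h1).getD j "" := by
    simp [pvCol]
  have f2 : (pvCol b2 j)[i]'(by simpa [pvCol] using h2) = (getElem b2 i h2).getD j "" := by
    simp [pvCol]
  have hg : (getElem b1 i h1).getD j "" = (getElem b2 i h2).getD j "" := by
    rw [← f1, ← f2]
    exact List.getElem_of_eq (hc j) _
  rw [List.getD_eq_getElem _ "" hj1, List.getD_eq_getElem _ "" hj2] at hg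
  exact hg

-- the per-column steps of the two ports agree and preserve shape / other columns
theorem pvFold_eq : ∀ (js : List Nat) (b b0 : List (List String)),
    js.Nodup →
    b.map List.length = b0.map List.length →
    (∀ j ∈ js, ∀ r ∈ b0, j < r.length) →
    (∀ j ∈ js, pvCol b j = pvCol b0 j) →
    js.foldl (fun b' j => pvDrop j b' (pvFindBlank b0 j b0.length) (pvFindBlank b0 j b0.length).toNat) b =
    js.foldl (fun b' j =>
      (List.range b0.length).foldl
        (fun b'' i => pvCellSet b'' i j
          (if i < b0.length - (((List.range b0.length).map (fun i => pvCellGet b' i j)).filter (fun v => v ≠ "0")).length then "0"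
           else (((List.range b0.length).map (fun i => pvCellGet b' i j)).filter (fun v => v ≠ "0")).getD
             (i - (b0.length - (((List.range b0.length).map (fun i => pvCellGet b' i j)).filter (fun v => v ≠ "0")).length)) "")) b') b := by
  intro js
  induction js with
  | nil => intros; rfl
  | cons j js ih =>
    intro b b0 hnd hlen hrows hcols
    simp only [List.foldl_cons]
    have hb : b.length = b0.length := by
      have := congrArg List.length hlen; simpa using this
    have Hj : ∀ r ∈ b, j < r.length :=
      pvRowlens_lt b b0 j hlen (hrows j (List.mem_cons_self))
    have hcolj : pvCol b j = pvCol b0 j := hcols j (List.mem_cons_self)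
    have hclen : (pvCol b j).length = b0.length := by rw [pvCol_length, hb]
    have hblank : pvFindBlank b0 j b0.length = pvFindBlankCol (pvCol b j) (pvCol b j).length := by
      rw [pvFindBlank_col, ← hcolj, hclen]
    set blank := pvFindBlank b0 j b0.length with hbk
    have hH : blank.toNat = 0 ∨ ((blank.toNat : Int) ≤ blank ∧ blank < (b.length : Int)) := by
      rcases pvFindBlankCol_spec (pvCol b j) (pvCol b j).length with ⟨h1, _⟩ | ⟨i, h1, h2, _, _⟩
      · left; rw [hblank, h1]; rfl
      · right
        rw [hblank, h1]
        constructor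
        · simp
        · rw [hclen] at h2; exact_mod_cast (by omega : (i : Int) < (b.length : Int))
    obtain ⟨a1len, a1col, a1ne⟩ :=
      pvDrop_col blank.toNat b j blank Hj hH
    have a1grav : pvCol (pvDrop j b blank blank.toNat) j = pvGrav (pvCol b j) := by
      rw [a1col, hblank, pvDropCol_grav]
    set vals := ((List.range b0.length).map (fun i => pvCellGet b i j)).filter (fun v => v ≠ "0")
      with hvals
    have hvals' : vals = (pvCol b j).filter (fun v => v ≠ "0") := by
      rw [hvals]
      congr 1
      calc (List.range b0.length).map (fun i => pvCellGet b i j)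
          = (List.range (pvCol b j).length).map (fun i => (pvCol b j).getD i "") := by
            rw [hclen]
            exact List.map_congr_left (fun i _ => pvCellGet_col b i j)
        _ = pvCol b j := pvMap_range_getD (pvCol b j)
    obtain ⟨b1len, b1col, b1ne⟩ :=
      pvWrite_col b0.length b j
        (fun i => if i < b0.length - vals.length then "0" else vals.getD (i - (b0.length - vals.length)) "")
        Hj (by omega)
    have b1grav : pvCol ((List.range b0.length).foldl
        (fun b'' i => pvCellSet b'' i j
          (if i < b0.length - vals.length then "0" else vals.getD (i - (b0.length - vals.length)) "")) b) j =
        pvGrav (pvCol b j) := by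
      rw [b1col]
      have hdrop : (pvCol b j).drop b0.length = [] := by
        apply List.drop_eq_nil_of_le
        omega
      rw [hdrop, List.append_nil]
      have := pvPad_map (pvCol b j)
      rw [← this, hclen, hvals']
    have hAB : pvDrop j b blank blank.toNat =
        (List.range b0.length).foldl
          (fun b'' i => pvCellSet b'' i j
            (if i < b0.length - vals.length then "0" else vals.getD (i - (b0.length - vals.length)) "")) b := by
      apply pvBoard_ext
      · rw [a1len, b1len]
      · intro j'
        by_cases hj' : j' = j
        · rw [hj', a1grav, b1grav]
        · rw [a1ne j' hj', b1ne j' hj']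
    rw [hAB]
    apply ih
    · exact (List.nodup_cons.mp hnd).2
    · rw [b1len, hlen]
    · exact fun j' hj' => hrows j' (List.mem_cons_of_mem _ hj')
    · intro j' hj'
      have hne : j' ≠ j := by
        rintro rfl
        exact (List.nodup_cons.mp hnd).1 hj'
      rw [b1ne j' hne]
      exact hcols j' (List.mem_cons_of_mem _ hj')

-- ===== VERDICT (by name: the statement is the Claim_ definition above) =====
theorem rearrangeBlock_spec : Claim_equal_rearrangeBlock := by
  intro board hdom hpre
  obtain ⟨hne, hrows⟩ := hpre
  cases board with
  | nil => exact absurd rfl hne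
  | cons r rs =>
    simp only [Spec_rearrangeBlock, rearrangeBlock, rearrangeBlock_alt]
    have hn : ((PySem.List.pyGet? (r :: rs) 0).getD []).length = r.length := by
      simp [PySem.List.pyGet?, PySem.List.pyIdx?]
    rw [hn]
    have hgd : ∀ (acc : List (List String)), ∀ j ∈ List.range r.length,
        pvDrop j acc
          (((List.range r.length).map (fun j => pvFindBlank (r :: rs) j (r :: rs).length)).getD j (-1))
          (((List.range r.length).map (fun j => pvFindBlank (r :: rs) j (r :: rs).length)).getD j (-1)).toNat =
        pvDrop j acc (pvFindBlank (r :: rs) j (r :: rs).length)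
          (pvFindBlank (r :: rs) j (r :: rs).length).toNat := by
      intro acc j hj
      have hjlt : j < r.length := List.mem_range.mp hj
      rw [List.getD_eq_getElem _ _ (by simpa using hjlt)]
      simp
    rw [PySem.List.foldl_congr_mem _ _ _ _ hgd]
    exact pvFold_eq (List.range r.length) (r :: rs) (r :: rs) List.nodup_range rfl
      (fun j hj row hrow => by
        have := hrows row hrow
        simp only [List.headD_cons] at this
        have hjlt : j < r.length := List.mem_range.mp hj
        omega)
      (fun _ _ => rfl)
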